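-- pv_equiv track=rewrite | github.com/kashikuri/crosswords | gen_xword.py | _runs_ok_row
-- ===== SOURCE A (Python) =====
-- def _runs_ok_row(bitmask: int, width: int, min_len: int, max_len: int) -> bool:
--     run = 0
--     for i in range(width + 1):
--         bit = 1 if i == width else ((bitmask >> i) & 1)  # 1 = black, 0 = white
--         if bit == 0:
--             run += 1
--         else:
--             if run and not (min_len <= run <= max_len):
--                 return False
--             run = 0
--     return True
-- ===== SOURCE B (Python) =====
-- def _runs_ok_row(bitmask: int, width: int, min_len: int, max_len: int) -> bool:
--     # No per-cell scan: build the integer mask of white cells and peel off one whole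
--     # maximal white run per iteration with low-bit/carry arithmetic, validating as we go.
--     if width <= 0:
--         return True
--     w = ~bitmask & ((1 << width) - 1)   # bit i set  <=>  cell i is white
--     while w:
--         w >>= (w & -w).bit_length() - 1   # drop the black gap below the next run (w now odd)
--         t = (w + 1) & -(w + 1)            # == 2**n where n = length of the lowest run
--         n = t.bit_length() - 1
--         if not (min_len <= n <= max_len):
--             return False
--         w >>= n                           # drop the validated run
--     return True
-- ===== Notes on version B (the rewrite author's own statement) =====
-- stated objective: alternative
-- what changed: A scans every cell index 0..width with a sentinel black cell and a running white counter; B instead builds the integer mask of white cells and peels off one whole maximal white run per loop iteration with low-bit/carry arithmetic ((w & -w), a carry add, bit_length), validating each run length as it is peeled.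
import Mathlib
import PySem

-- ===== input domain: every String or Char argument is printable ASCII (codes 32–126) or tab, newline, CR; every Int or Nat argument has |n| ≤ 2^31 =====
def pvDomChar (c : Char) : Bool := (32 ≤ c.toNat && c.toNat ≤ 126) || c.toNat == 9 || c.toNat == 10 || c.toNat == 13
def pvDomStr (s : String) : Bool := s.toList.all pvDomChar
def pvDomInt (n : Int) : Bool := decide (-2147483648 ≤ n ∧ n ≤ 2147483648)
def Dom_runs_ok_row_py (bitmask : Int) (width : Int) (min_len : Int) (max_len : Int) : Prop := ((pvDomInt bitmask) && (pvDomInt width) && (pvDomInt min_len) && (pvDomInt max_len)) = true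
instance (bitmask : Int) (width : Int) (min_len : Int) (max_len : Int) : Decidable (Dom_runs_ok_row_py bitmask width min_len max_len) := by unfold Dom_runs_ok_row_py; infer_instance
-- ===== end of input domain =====

-- B replaces A's per-cell sentinel scan with low-bit/carry arithmetic on the white-cell mask
-- integer: one loop iteration per maximal white run instead of one per cell (alternative algorithm).

-- ===== PORT A =====
-- the Python expression '(bitmask >> i) & 1'
def blackBit (bitmask : Int) (i : Int) : Int := PySem.Int.band (bitmask >>> i.toNat) 1

-- loop over the remaining indices of range(width+1), state = current white-run length
def runsA_loop (bitmask : Int) (width : Int) (min_len : Int) (max_len : Int) : List Int → Int → Bool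
  | [], _ => true
  | i :: rest, run =>
    let bit : Int := if i = width then 1 else blackBit bitmask i
    if bit = 0 then runsA_loop bitmask width min_len max_len rest (run + 1)
    else if run ≠ 0 ∧ ¬(min_len ≤ run ∧ run ≤ max_len) then false
    else runsA_loop bitmask width min_len max_len rest 0

def runs_ok_row_py (bitmask : Int) (width : Int) (min_len : Int) (max_len : Int) : Bool :=
  runsA_loop bitmask width min_len max_len (PySem.List.pyRange 0 (width + 1) 1) 0

-- ===== PORT B =====
-- the 'while w:' loop: one whole white run is peeled off per iteration with
-- low-bit/carry arithmetic. The fuel argument only makes the recursion structural;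
-- fuel > w is enough since w strictly shrinks each pass.
def runsB : Nat → Int → Int → Int → Bool
  | 0, _, _, _ => true
  | fuel + 1, min_len, max_len, w =>
    if w = 0 then true
    else
      -- w >>= (w & -w).bit_length() - 1
      let w1 := w >>> (PySem.Int.bitLength (PySem.Int.band w (-w)) - 1)
      -- t = (w + 1) & -(w + 1)
      let t := PySem.Int.band (w1 + 1) (-(w1 + 1))
      -- n = t.bit_length() - 1  (a nonnegative Python int, modelled as Nat)
      let n : Nat := PySem.Int.bitLength t - 1
      if ¬ (min_len ≤ (n : Int) ∧ (n : Int) ≤ max_len) then false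
      else runsB fuel min_len max_len (w1 >>> n)

def runs_ok_row_py_alt (bitmask : Int) (width : Int) (min_len : Int) (max_len : Int) : Bool :=
  if width ≤ 0 then true
  else
    -- w = ~bitmask & ((1 << width) - 1)
    let w : Int := PySem.Int.band (Int.not bitmask) ((1 <<< width.toNat) - 1)
    runsB (w.toNat + 1) min_len max_len w

-- ===== PRECONDITION & SPEC =====
def Spec_runs_ok_row_py (bitmask : Int) (width : Int) (min_len : Int) (max_len : Int) (out : Bool) : Prop := out = runs_ok_row_py_alt bitmask width min_len max_len
instance (bitmask : Int) (width : Int) (min_len : Int) (max_len : Int) (out : Bool) : Decidable (Spec_runs_ok_row_py bitmask width min_len max_len out) := by unfold Spec_runs_ok_row_py; infer_instance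

-- ===== CLAIM =====
def Claim_equal_runs_ok_row_py : Prop := ∀ (bitmask : Int) (width : Int) (min_len : Int) (max_len : Int), Dom_runs_ok_row_py bitmask width min_len max_len → Spec_runs_ok_row_py bitmask width min_len max_len (runs_ok_row_py bitmask width min_len max_len)

-- ===== LEMMAS AND PROOFS =====

-- Reference run decomposition: mruns fuel v r = list of maximal 1-run lengths of the low
-- `fuel` bits of v, where r ones have already been counted just below bit 0.
def mruns : Nat → Nat → Nat → List Nat
  | 0, _, r => if r = 0 then [] else [r]
  | f + 1, v, r =>
    if v % 2 = 1 then mruns f (v / 2) (r + 1)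
    else if r = 0 then mruns f (v / 2) 0
    else r :: mruns f (v / 2) 0

theorem mruns_zero (f : Nat) : ∀ r : Nat, mruns f 0 r = if r = 0 then [] else [r] := by
  induction f with
  | zero => intro r; rfl
  | succ f ih =>
    intro r
    have h0 : mruns f 0 0 = [] := by simpa using ih 0
    rw [mruns]
    norm_num
    by_cases hr : r = 0 <;> simp [hr, h0]

-- PySem.Int.band with an all-ones mask is emod
theorem band_two_pow_sub_one (x : Int) (k : Nat) :
    PySem.Int.band x ((2 : Int) ^ k - 1) = x % 2 ^ k := by
  have hp : 1 ≤ 2 ^ k := Nat.one_le_two_pow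
  have hcast : ((2 : Int) ^ k) = ((2 ^ k : Nat) : Int) := by push_cast; ring
  have hmt : ((2 : Int) ^ k - 1).toNat = 2 ^ k - 1 := by omega
  by_cases hx : 0 ≤ x
  · rw [PySem.Int.band, if_pos hx, if_pos (by omega)]
    rw [hmt, Nat.and_two_pow_sub_one_eq_mod]
    rw [hcast, ← Int.toNat_of_nonneg hx]
    push_cast
    rfl
  · rw [PySem.Int.band, if_neg hx, if_pos (by omega)]
    set y : Nat := (-x - 1).toNat with hy
    have hyx : (y : Int) = -x - 1 := by omega
    rw [hmt, Nat.and_comm, Nat.and_two_pow_sub_one_eq_mod]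
    -- x % 2^k = 2^k - 1 - (y % 2^k)
    have hdm : ((2 ^ k : Nat) : Int) * ((y / 2 ^ k : Nat) : Int) + ((y % 2 ^ k : Nat) : Int) = (y : Int) := by
      exact_mod_cast Nat.div_add_mod y (2 ^ k)
    have hxx : x = -(y : Int) - 1 := by omega
    have hxe : x = ((2 : Int) ^ k - 1 - (y % 2 ^ k : Nat)) + ((2 : Int) ^ k) * (-((y / 2 ^ k : Nat) : Int) - 1) := by
      rw [hxx, hcast]; linear_combination hdm
    have hmlt : y % 2 ^ k < 2 ^ k := Nat.mod_lt _ (by omega)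
    have hkey : x % 2 ^ k = (2 : Int) ^ k - 1 - (y % 2 ^ k : Nat) := by
      rw [hxe, Int.add_mul_emod_self_left]
      exact Int.emod_eq_of_lt (by push_cast; omega) (by push_cast; omega)
    omega

-- floor division of -x-1 flips the quotient: (-x-1)/m = -(x/m) - 1 for m > 0
theorem neg_sub_one_ediv (x m : Int) (hm : 0 < m) : (-x - 1) / m = -(x / m) - 1 := by
  have hdm : m * (x / m) + x % m = x := Int.mul_ediv_add_emod x m
  have hr0 : 0 ≤ x % m := Int.emod_nonneg x (by omega)
  have hrm : x % m < m := Int.emod_lt_of_pos x hm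
  have hxe : -x - 1 = (m - 1 - x % m) + (-(x / m) - 1) * m := by ring_nf; omega
  rw [hxe, Int.add_mul_ediv_right _ _ (by omega : m ≠ 0),
      Int.ediv_eq_zero_of_lt (by omega) (by omega)]
  omega

-- dropping the high bits does not change a low bit: (x % 2^K / 2^j) % 2 = (x / 2^j) % 2 for j < K
theorem emod_pow_ediv_emod_two (x : Int) (K j : Nat) (hj : j < K) :
    ((x % 2 ^ K) / 2 ^ j) % 2 = (x / 2 ^ j) % 2 := by
  have h1 : (2 : Int) ^ (K - j) * 2 ^ j = 2 ^ K := by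
    rw [← pow_add]; congr 1; omega
  have hxe : x % 2 ^ K = x + (-(2 ^ (K - j) * (x / 2 ^ K))) * 2 ^ j := by
    rw [Int.emod_def]
    linear_combination (x / 2 ^ K) * h1
  rw [hxe, Int.add_mul_ediv_right _ _ (by positivity : ((2:Int) ^ j) ≠ 0)]
  have h2 : (2 : Int) ^ (K - j) = 2 * 2 ^ (K - j - 1) := by
    rw [← pow_succ']; congr 1; omega
  rw [h2, mul_assoc]
  generalize (2 : Int) ^ (K - j - 1) * (x / 2 ^ K) = t
  omega

-- the white-mask bit at j is the complement of bitmask's bit at j (below width)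
theorem white_bit_iff (bitmask : Int) (K j : Nat) (hj : j < K) :
    ((Int.not bitmask % 2 ^ K) / 2 ^ j) % 2 = 1 ↔ (bitmask / 2 ^ j) % 2 = 0 := by
  rw [emod_pow_ediv_emod_two _ _ _ hj]
  have hnot : Int.not bitmask = -bitmask - 1 := by
    cases bitmask with
    | ofNat n => simp [Int.not]; omega
    | negSucc n => simp [Int.not]
  rw [hnot, neg_sub_one_ediv bitmask (2 ^ j) (by positivity)]
  omega

theorem blackBit_eq (bitmask j : Int) :
    blackBit bitmask j = (bitmask >>> j.toNat) % 2 := by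
  rw [blackBit, PySem.Int.band_one, PySem.Int.mod_eq_emod_of_pos (by omega)]

def allValid (min_len max_len : Int) (l : List Nat) : Bool :=
  l.all (fun n => decide (min_len ≤ (n : Int) ∧ (n : Int) ≤ max_len))

-- A-side invariant: resuming A's loop at index j with the run counter r equals validating
-- the reference run list of the remaining white bits, with r pending ones.
theorem runsA_eq_mruns (bitmask width min_len max_len : Int) (hw : 0 < width)
    (W : Int) (hW : W = Int.not bitmask % 2 ^ width.toNat) :
    ∀ (n : Nat) (j : Int) (r v : Nat), 0 ≤ j → j ≤ width → n = (width - j).toNat →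
    (v : Int) = W / 2 ^ j.toNat →
    runsA_loop bitmask width min_len max_len (PySem.List.pyRange j (width + 1) 1) (r : Int) =
    allValid min_len max_len (mruns n v r) := by
  intro n
  induction n with
  | zero =>
    intro j r v hj hjw hn hv
    have hje : j = width := by omega
    subst hje
    rw [PySem.List.pyRange_one_cons (by omega), PySem.List.pyRange_one_eq_nil (by omega)]
    simp only [runsA_loop]
    rw [if_pos trivial, if_neg (show ¬ (1 : Int) = 0 by norm_num)]
    by_cases hr : r = 0
    · subst hr
      rw [if_neg (by simp), mruns, if_pos rfl]; rfl
    · rw [mruns, if_neg hr]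
      by_cases hok : min_len ≤ (r : Int) ∧ (r : Int) ≤ max_len
      · rw [if_neg (fun h => h.2 hok)]
        simp only [allValid, List.all_cons, List.all_nil]
        simp [hok]
      · rw [if_pos ⟨by omega, hok⟩]
        simp only [allValid, List.all_cons, List.all_nil]
        simp [hok]
  | succ n ih =>
    intro j r v hj hjw hn hv
    have hjlt : j < width := by omega
    rw [PySem.List.pyRange_one_cons (by omega)]
    simp only [runsA_loop]
    rw [if_neg (by omega : ¬ j = width)]
    have hWnn : 0 ≤ W := by
      rw [hW]; exact Int.emod_nonneg _ (by positivity)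
    have hvhalf : ((v / 2 : Nat) : Int) = W / 2 ^ (j + 1).toNat := by
      have h1 : (2 : Int) ^ (j + 1).toNat = 2 ^ j.toNat * 2 := by
        rw [← pow_succ]; congr 1; omega
      rw [h1, ← Int.ediv_ediv_of_nonneg (by positivity : (0:Int) ≤ 2 ^ j.toNat), ← hv]
      push_cast
      omega
    have hwhite : (v : Int) % 2 = 1 ↔ blackBit bitmask j = 0 := by
      rw [blackBit_eq, Int.shiftRight_eq_div_pow, hv, hW]
      exact white_bit_iff bitmask width.toNat j.toNat (by omega)
    by_cases hb : blackBit bitmask j = 0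
    · -- white cell
      rw [if_pos hb]
      have hvo : v % 2 = 1 := by
        have := hwhite.mpr hb; omega
      rw [mruns, if_pos hvo]
      have := ih (j + 1) (r + 1) (v / 2) (by omega) (by omega) (by omega) hvhalf
      push_cast at this ⊢
      exact this
    · -- black cell
      rw [if_neg hb]
      have hve : ¬ v % 2 = 1 := by
        intro h; exact hb (hwhite.mp (by omega))
      rw [mruns, if_neg hve]
      have hrest := ih (j + 1) 0 (v / 2) (by omega) (by omega) (by omega) hvhalf
      by_cases hr : r = 0
      · subst hr
        rw [if_neg (by simp), if_pos rfl]
        exact_mod_cast hrest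
      · rw [if_neg hr]
        by_cases hok : min_len ≤ (r : Int) ∧ (r : Int) ≤ max_len
        · rw [if_neg (fun h => h.2 hok)]
          simp only [allValid, List.all_cons]
          have : decide (min_len ≤ (r : Int) ∧ (r : Int) ≤ max_len) = true := by simp [hok]
          rw [this, Bool.true_and]
          exact_mod_cast hrest
        · rw [if_pos ⟨by omega, hok⟩]
          simp only [allValid, List.all_cons]
          have : decide (min_len ≤ (r : Int) ∧ (r : Int) ≤ max_len) = false := by simp [hok]
          rw [this, Bool.false_and]
    
-- parity recursion for Nat.and
theorem and_mul_two_succ_left (a b : Nat) : (2 * a + 1) &&& (2 * b) = 2 * (a &&& b) := by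
  have h := Nat.bitwise_bit (f := and) rfl true a false b
  simpa [Nat.bit, Nat.land, two_mul] using h

theorem and_mul_two_succ_right (a b : Nat) : (2 * a) &&& (2 * b + 1) = 2 * (a &&& b) := by
  have h := Nat.bitwise_bit (f := and) rfl false a true b
  simpa [Nat.bit, Nat.land, two_mul] using h

-- clearing the lowest set bit: (u·2^s) &&& (u·2^s − 1) = (u−1)·2^s for odd u
theorem and_pred_lowbit : ∀ (s u : Nat), u % 2 = 1 → (u * 2 ^ s) &&& (u * 2 ^ s - 1) = (u - 1) * 2 ^ s := by
  intro s
  induction s with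
  | zero =>
    intro u hu
    obtain ⟨e, rfl⟩ : ∃ e, u = 2 * e + 1 := ⟨u / 2, by omega⟩
    have h := and_mul_two_succ_left e e
    rw [Nat.and_self] at h
    simpa [Nat.add_sub_cancel] using h
  | succ s ih =>
    intro u hu
    have hX : 0 < u * 2 ^ s := Nat.mul_pos (by omega) (Nat.two_pow_pos s)
    have h1 : u * 2 ^ (s + 1) = 2 * (u * 2 ^ s) := by rw [pow_succ]; ring
    have h2 : u * 2 ^ (s + 1) - 1 = 2 * (u * 2 ^ s - 1) + 1 := by omega
    rw [h2, h1, and_mul_two_succ_right (u * 2 ^ s) (u * 2 ^ s - 1), ih u hu, pow_succ]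
    ring

-- w & -w on a positive int is Nat 'clear lowest bit' arithmetic
theorem band_lowbit (u s : Nat) (hu : u % 2 = 1) :
    PySem.Int.band ((u * 2 ^ s : Nat) : Int) (-((u * 2 ^ s : Nat) : Int)) = ((2 ^ s : Nat) : Int) := by
  have hpos : 0 < u * 2 ^ s := Nat.mul_pos (by omega) (Nat.two_pow_pos s)
  rw [PySem.Int.band, if_pos (by omega), if_neg (by omega)]
  have h1 : (-(-((u * 2 ^ s : Nat) : Int)) - 1).toNat = u * 2 ^ s - 1 := by omega
  rw [h1, Int.toNat_natCast, and_pred_lowbit s u hu]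
  have h3 : u * 2 ^ s - (u - 1) * 2 ^ s = 2 ^ s := by
    rw [← Nat.sub_mul, show u - (u - 1) = 1 by omega, one_mul]
  rw [h3]

theorem bitLength_two_pow : ∀ k : Nat, PySem.Int.bitLength ((2 ^ k : Nat) : Int) = k + 1 := by
  intro k
  induction k with
  | zero =>
    rw [PySem.Int.bitLength_natCast (by omega)]
    norm_num
  | succ k ih =>
    rw [PySem.Int.bitLength_natCast (by positivity)]
    have h1 : 2 ^ (k + 1) / 2 = 2 ^ k := by
      rw [pow_succ]; omega
    rw [h1, ih]

-- every positive Nat is odd · 2^s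
theorem pos_decomp (v : Nat) : 0 < v → ∃ s u, u % 2 = 1 ∧ v = u * 2 ^ s := by
  induction v using Nat.strong_induction_on with
  | _ v ih =>
    intro hv
    by_cases ho : v % 2 = 1
    · exact ⟨0, v, ho, by ring⟩
    · obtain ⟨s, u, hu, he⟩ := ih (v / 2) (by omega) (by omega)
      refine ⟨s + 1, u, hu, ?_⟩
      have h2v : v = 2 * (v / 2) := by omega
      rw [h2v, he, pow_succ]
      ring

-- every odd Nat is m · 2^(L+1) + 2^L − 1 with L ≥ 1 (L = number of trailing ones)
theorem odd_decomp (u : Nat) : u % 2 = 1 → ∃ L m, 1 ≤ L ∧ u = m * 2 ^ (L + 1) + 2 ^ L - 1 := by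
  induction u using Nat.strong_induction_on with
  | _ u ih =>
    intro hu
    by_cases h2 : (u / 2) % 2 = 1
    · obtain ⟨L, m, hL, he⟩ := ih (u / 2) (by omega) h2
      refine ⟨L + 1, m, by omega, ?_⟩
      have p1 : m * 2 ^ (L + 1 + 1) = 2 * (m * 2 ^ (L + 1)) := by rw [pow_succ]; ring
      have p2 : (2:Nat) ^ (L + 1) = 2 * 2 ^ L := by rw [pow_succ]; ring
      have hp : 1 ≤ (2:Nat) ^ L := Nat.one_le_two_pow
      omega
    · refine ⟨1, u / 4, by omega, ?_⟩
      have : u / 4 * 2 ^ (1 + 1) = u / 4 * 4 := by norm_num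
      omega

-- mruns does not depend on the fuel once the fuel is sufficient
theorem mruns_irrel (v : Nat) : ∀ (K1 K2 r : Nat), v < 2 ^ K1 → v < 2 ^ K2 →
    mruns K1 v r = mruns K2 v r := by
  induction v using Nat.strong_induction_on with
  | _ v ih =>
    intro K1 K2 r h1 h2
    by_cases h0 : v = 0
    · subst h0; rw [mruns_zero, mruns_zero]
    · obtain ⟨a, rfl⟩ : ∃ a, K1 = a + 1 := ⟨K1 - 1, by rcases K1 with _ | a <;> simp_all⟩
      obtain ⟨b, rfl⟩ : ∃ b, K2 = b + 1 := ⟨K2 - 1, by rcases K2 with _ | b <;> simp_all⟩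
      rw [pow_succ] at h1 h2
      by_cases ho : v % 2 = 1
      · rw [mruns, if_pos ho, mruns, if_pos ho]
        exact ih (v / 2) (by omega) a b (r + 1) (by omega) (by omega)
      · rw [mruns, if_neg ho, mruns, if_neg ho]
        by_cases hr : r = 0
        · rw [if_pos hr, if_pos hr, ih (v / 2) (by omega) a b 0 (by omega) (by omega)]
        · rw [if_neg hr, if_neg hr, ih (v / 2) (by omega) a b 0 (by omega) (by omega)]

-- skipping the black gap below the next white run
theorem mruns_gap : ∀ (s u K : Nat), mruns (s + K) (u * 2 ^ s) 0 = mruns K u 0 := by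
  intro s
  induction s with
  | zero => intro u K; norm_num
  | succ s ih =>
    intro u K
    have h1 : u * 2 ^ (s + 1) = 2 * (u * 2 ^ s) := by rw [pow_succ]; ring
    have h2 : s + 1 + K = (s + K) + 1 := by omega
    rw [h1, h2, mruns, if_neg (by omega), if_pos rfl]
    have h3 : 2 * (u * 2 ^ s) / 2 = u * 2 ^ s := by omega
    rw [h3, ih u K]

-- consuming one whole white run (and the black cell above it)
theorem mruns_run : ∀ (L m K r : Nat), 1 ≤ L →
    mruns (L + 1 + K) (m * 2 ^ (L + 1) + 2 ^ L - 1) r = (r + L) :: mruns K m 0 := by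
  intro L
  induction L with
  | zero => intro m K r h; omega
  | succ L ih =>
    intro m K r _
    by_cases hL : L = 0
    · subst hL
      have e1 : (2:Nat) ^ (0 + 1 + 1) = 4 := by norm_num
      have e2 : (2:Nat) ^ (0 + 1) = 2 := by norm_num
      have h1 : m * 2 ^ (0 + 1 + 1) + 2 ^ (0 + 1) - 1 = 2 * (2 * m) + 1 := by
        rw [e1, e2]; omega
      rw [h1, show (0:Nat) + 1 + 1 + K = (0 + 1 + K) + 1 by omega, mruns, if_pos (by omega)]
      have h2 : (2 * (2 * m) + 1) / 2 = 2 * m := by omega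
      rw [h2, show (0:Nat) + 1 + K = K + 1 by omega, mruns, if_neg (by omega), if_neg (by omega)]
      have h3 : 2 * m / 2 = m := by omega
      rw [h3, show r + 1 = r + (0 + 1) by omega]
    · have hL1 : 1 ≤ L := by omega
      have hB := Nat.one_le_two_pow (n := L)
      have e1 : m * 2 ^ (L + 1 + 1) = 2 * (m * 2 ^ (L + 1)) := by rw [pow_succ]; ring
      have e2 : (2:Nat) ^ (L + 1) = 2 * 2 ^ L := by rw [pow_succ]; ring
      have h1 : m * 2 ^ (L + 1 + 1) + 2 ^ (L + 1) - 1 =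
          2 * (m * 2 ^ (L + 1) + 2 ^ L - 1) + 1 := by omega
      rw [h1, show L + 1 + 1 + K = (L + 1 + K) + 1 by omega, mruns, if_pos (by omega)]
      have h2 : (2 * (m * 2 ^ (L + 1) + 2 ^ L - 1) + 1) / 2 = m * 2 ^ (L + 1) + 2 ^ L - 1 := by omega
      rw [h2, ih m K (r + 1) hL1, show r + 1 + L = r + (L + 1) by omega]

-- B-side: the run-peeling loop computes the validation of the reference run list
theorem runsB_eq_mruns (min_len max_len : Int) (v : Nat) : ∀ (K fuel : Nat),
    v < 2 ^ K → v < fuel →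
    runsB fuel min_len max_len (v : Int) = allValid min_len max_len (mruns K v 0) := by
  induction v using Nat.strong_induction_on with
  | _ v ih =>
    intro K fuel hK hf
    obtain ⟨F, rfl⟩ : ∃ F, fuel = F + 1 := ⟨fuel - 1, by omega⟩
    by_cases h0 : v = 0
    · subst h0
      rw [runsB, mruns_zero]
      norm_num [allValid]
    · obtain ⟨s, u, hu, hv⟩ := pos_decomp v (by omega)
      obtain ⟨L, m, hL, hud⟩ := odd_decomp u hu
      have hp : ∀ k : Nat, 1 ≤ (2:Nat) ^ k := fun k => Nat.one_le_two_pow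
      have hupos : 0 < u := by omega
      -- w1 = v >> s = u
      have hw1 : ((v : Int) >>> (PySem.Int.bitLength (PySem.Int.band (v : Int) (-(v : Int))) - 1)) = (u : Int) := by
        rw [hv, band_lowbit u s hu, bitLength_two_pow s, Nat.add_sub_cancel,
            Int.shiftRight_eq_div_pow,
            show ((u * 2 ^ s : Nat) : Int) = (u : Int) * (2 : Int) ^ s by push_cast; ring]
        exact Int.mul_ediv_cancel _ (by positivity)
      -- t = (u+1) & -(u+1) = 2^L
      have hu1 : u + 1 = (2 * m + 1) * 2 ^ L := by
        have e1 : m * 2 ^ (L + 1) = 2 * (m * 2 ^ L) := by rw [pow_succ]; ring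
        have e2 : (2 * m + 1) * 2 ^ L = 2 * (m * 2 ^ L) + 2 ^ L := by ring
        have := hp L
        omega
      have ht : PySem.Int.band ((u : Int) + 1) (-((u : Int) + 1)) = ((2 ^ L : Nat) : Int) := by
        have hc : ((u : Int) + 1) = (((2 * m + 1) * 2 ^ L : Nat) : Int) := by
          rw [← hu1]; push_cast; ring
        rw [hc, band_lowbit (2 * m + 1) L (by omega)]
      -- u >> L = 2m
      have hNat : u / 2 ^ L = 2 * m := by
        have e1 : m * 2 ^ (L + 1) = 2 * m * 2 ^ L := by rw [pow_succ]; ring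
        have := hp L
        rw [hud, e1, show 2 * m * 2 ^ L + 2 ^ L - 1 = 2 ^ L - 1 + 2 * m * 2 ^ L by omega,
            Nat.add_mul_div_right _ _ (by omega : 0 < 2 ^ L), Nat.div_eq_of_lt (by omega)]
        omega
      have hshift : ((u : Int) >>> L) = ((2 * m : Nat) : Int) := by
        rw [Int.shiftRight_eq_div_pow]
        exact_mod_cast hNat
      -- the mruns side: top up the fuel, strip gap and run
      have hKpos : 1 ≤ K := by
        by_contra h
        have : K = 0 := by omega
        subst this; simp at hK; omega
      have hv2K : v < 2 ^ (s + (L + 1 + K)) := by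
        calc v < 2 ^ K := hK
        _ ≤ 2 ^ (s + (L + 1 + K)) := Nat.pow_le_pow_right (by omega) (by omega)
      have hmr : mruns K v 0 = L :: mruns K m 0 := by
        rw [mruns_irrel v K (s + (L + 1 + K)) 0 hK hv2K, hv, mruns_gap s u (L + 1 + K), hud,
            mruns_run L m K 0 hL, Nat.zero_add]
      -- 2m < v, m < 2^K bounds for the recursive step
      have h2m_lt : 2 * m < v := by
        have huv : u ≤ v := by
          rw [hv]
          calc u = u * 1 := by ring
          _ ≤ u * 2 ^ s := Nat.mul_le_mul_left _ (hp s)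
        have h2L : 2 ≤ 2 ^ L := by
          calc (2:Nat) = 2 ^ 1 := by norm_num
          _ ≤ 2 ^ L := Nat.pow_le_pow_right (by omega) hL
        have e4 : 2 * m ≤ m * 2 ^ L := by
          calc 2 * m = m * 2 := by ring
          _ ≤ m * 2 ^ L := Nat.mul_le_mul_left m h2L
        have e1 : m * 2 ^ (L + 1) = 2 * (m * 2 ^ L) := by rw [pow_succ]; ring
        have := hp L
        omega
      have h2m_2K : 2 * m < 2 ^ K := by omega
      have hrec := ih (2 * m) h2m_lt K F h2m_2K (by omega)
      -- mruns K (2m) 0 = mruns K m 0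
      have hmm : mruns K (2 * m) 0 = mruns K m 0 := by
        obtain ⟨a, rfl⟩ : ∃ a, K = a + 1 := ⟨K - 1, by omega⟩
        rw [mruns, if_neg (by omega), if_pos rfl]
        have h3 : 2 * m / 2 = m := by omega
        rw [h3]
        rw [pow_succ] at h2m_2K
        exact mruns_irrel m a (a + 1) 0 (by omega) (by
          calc m < 2 ^ a := by omega
          _ ≤ 2 ^ (a + 1) := Nat.pow_le_pow_right (by omega) (by omega))
      -- assemble one iteration of runsB
      rw [runsB]
      simp only [hw1, ht]
      rw [if_neg (by exact_mod_cast h0), bitLength_two_pow L, Nat.add_sub_cancel, hshift, hmr]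
      by_cases hok : min_len ≤ (L : Int) ∧ (L : Int) ≤ max_len
      · rw [if_neg (by simpa using hok)]
        rw [hrec, hmm]
        simp only [allValid, List.all_cons]
        simp [hok]
      · rw [if_pos (by simpa using hok)]
        simp only [allValid, List.all_cons]
        have : decide (min_len ≤ (L : Int) ∧ (L : Int) ≤ max_len) = false := by simp [hok]
        rw [this, Bool.false_and]

-- ===== VERDICT =====
theorem runs_ok_row_py_spec : Claim_equal_runs_ok_row_py := by
  intro bitmask width min_len max_len _
  unfold Spec_runs_ok_row_py runs_ok_row_py runs_ok_row_py_alt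
  by_cases hw : width ≤ 0
  · rw [if_pos hw]
    by_cases hw0 : width = 0
    · subst hw0
      rw [PySem.List.pyRange_one_cons (by omega), PySem.List.pyRange_one_eq_nil (by omega)]
      simp [runsA_loop]
    · rw [PySem.List.pyRange_one_eq_nil (by omega)]
      rfl
  · rw [if_neg hw]
    have hwpos : 0 < width := by omega
    set Wmask : Int := PySem.Int.band (Int.not bitmask) ((1 <<< width.toNat) - 1) with hWm
    have hshl : ((1 <<< width.toNat : Nat) : Int) - 1 = (2 : Int) ^ width.toNat - 1 := by
      rw [Nat.shiftLeft_eq, one_mul]; push_cast; ring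
    have hWe : Wmask = Int.not bitmask % 2 ^ width.toNat := by
      rw [hWm, hshl, band_two_pow_sub_one]
    have hWnn : 0 ≤ Wmask := by
      rw [hWe]; exact Int.emod_nonneg _ (by positivity)
    have hWlt : Wmask.toNat < 2 ^ width.toNat := by
      have : Wmask < 2 ^ width.toNat := by
        rw [hWe]; exact Int.emod_lt_of_pos _ (by positivity)
      have h2 : ((2 ^ width.toNat : Nat) : Int) = (2 : Int) ^ width.toNat := by push_cast; ring
      omega
    have hA := runsA_eq_mruns bitmask width min_len max_len hwpos Wmask hWe
      (width - 0).toNat 0 0 Wmask.toNat (by omega) (by omega) rfl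
      (by simpa using (Int.toNat_of_nonneg hWnn))
    have hB := runsB_eq_mruns min_len max_len Wmask.toNat width.toNat (Wmask.toNat + 1) hWlt (by omega)
    simp only [Int.sub_zero] at hA
    rw [show ((0 : Nat) : Int) = (0 : Int) by rfl] at hA
    rw [hA, ← hB, Int.toNat_of_nonneg hWnn]
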